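-- pv_equiv track=rewrite | github.com/Kokcr3ator/Fragment-based-generation | model/dataset.py | _preprocess_one_sequence
-- ===== SOURCE A (Python) =====
-- def _preprocess_one_sequence(tokenized_seq: list):
--     node_seq = []
--     edge_seq = []
--     routing_seq = []
--     for token in tokenized_seq:
--         if len(token) == 2:
--             node_seq.append(token)
--             routing_seq.append(0)
--
--         elif len(token) == 5:
--             edge_seq.append(token)
--             routing_seq.append(1)
--     return node_seq, edge_seq, routing_seq
-- ===== SOURCE B (Python) =====
-- def _preprocess_one_sequence(tokenized_seq: list):
--     node_seq = [t for t in tokenized_seq if len(t) == 2]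
--     edge_seq = [t for t in tokenized_seq if len(t) == 5]
--     routing_seq = [0 if len(t) == 2 else 1 for t in tokenized_seq if len(t) in (2, 5)]
--     return node_seq, edge_seq, routing_seq
-- ===== Notes on version B (the rewrite author's own statement) =====
-- stated objective: simpler
-- what changed: Replaced the single fused loop maintaining three accumulators with three independent filtered passes (comprehensions), one per output list.
import Mathlib
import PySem

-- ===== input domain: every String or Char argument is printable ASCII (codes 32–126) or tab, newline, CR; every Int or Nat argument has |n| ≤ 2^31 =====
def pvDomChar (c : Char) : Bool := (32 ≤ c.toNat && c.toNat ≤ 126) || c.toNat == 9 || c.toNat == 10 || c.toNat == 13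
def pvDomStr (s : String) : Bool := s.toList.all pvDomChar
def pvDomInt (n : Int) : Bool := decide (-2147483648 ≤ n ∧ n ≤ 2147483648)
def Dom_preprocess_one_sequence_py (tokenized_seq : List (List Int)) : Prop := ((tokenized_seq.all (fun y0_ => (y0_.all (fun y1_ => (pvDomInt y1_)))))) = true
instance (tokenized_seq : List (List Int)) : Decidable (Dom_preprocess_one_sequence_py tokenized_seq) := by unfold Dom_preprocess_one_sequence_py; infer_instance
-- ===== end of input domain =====

-- B replaces A's single fused loop over three accumulators with three independent filtered passes (simpler decomposition, same O(n) cost).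

-- ===== PORT A =====
-- A: one loop, three accumulators, appended in step.
def preprocess_one_sequence_py (tokenized_seq : List (List Int)) : List (List Int) × List (List Int) × List Int :=
  tokenized_seq.foldl
    (fun acc token =>
      if token.length = 2 then
        (acc.1 ++ [token], acc.2.1, acc.2.2 ++ [(0 : Int)])
      else if token.length = 5 then
        (acc.1, acc.2.1 ++ [token], acc.2.2 ++ [(1 : Int)])
      else acc)
    ([], [], [])

-- ===== PORT B =====
-- B: three separate filtered passes.
def preprocess_one_sequence_py_alt (tokenized_seq : List (List Int)) : List (List Int) × List (List Int) × List Int :=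
  (tokenized_seq.filter (fun t => t.length = 2),
   tokenized_seq.filter (fun t => t.length = 5),
   (tokenized_seq.filter (fun t => t.length = 2 ∨ t.length = 5)).map
     (fun t => if t.length = 2 then (0 : Int) else 1))

-- ===== PRECONDITION & SPEC =====
def Spec_preprocess_one_sequence_py (tokenized_seq : List (List Int)) (out : List (List Int) × List (List Int) × List Int) : Prop := out = preprocess_one_sequence_py_alt tokenized_seq
instance (tokenized_seq : List (List Int)) (out : List (List Int) × List (List Int) × List Int) : Decidable (Spec_preprocess_one_sequence_py tokenized_seq out) := by unfold Spec_preprocess_one_sequence_py; infer_instance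

-- ===== CLAIM (what is proved, stated in full; the proofs are below) =====
def Claim_equal_preprocess_one_sequence_py : Prop := ∀ (tokenized_seq : List (List Int)), Dom_preprocess_one_sequence_py tokenized_seq → Spec_preprocess_one_sequence_py tokenized_seq (preprocess_one_sequence_py tokenized_seq)

-- ===== LEMMAS AND PROOFS =====
theorem pv_fold_general (xs : List (List Int)) (a b : List (List Int)) (c : List Int) :
    xs.foldl
      (fun acc token =>
        if token.length = 2 then
          (acc.1 ++ [token], acc.2.1, acc.2.2 ++ [(0 : Int)])
        else if token.length = 5 then
          (acc.1, acc.2.1 ++ [token], acc.2.2 ++ [(1 : Int)])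
        else acc)
      (a, b, c)
    = (a ++ xs.filter (fun t => t.length = 2),
       b ++ xs.filter (fun t => t.length = 5),
       c ++ (xs.filter (fun t => t.length = 2 ∨ t.length = 5)).map
         (fun t => if t.length = 2 then (0 : Int) else 1)) := by
  induction xs generalizing a b c with
  | nil => simp
  | cons t xs ih =>
    by_cases h2 : t.length = 2
    · simp [List.foldl, h2, ih, List.filter]
    · by_cases h5 : t.length = 5
      · simp [List.foldl, h5, ih, List.filter]
      · simp [List.foldl, h2, h5, ih, List.filter]

-- ===== VERDICT (by name: the statement is the Claim_ definition above) =====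
theorem preprocess_one_sequence_py_spec : Claim_equal_preprocess_one_sequence_py := by
  intro xs _
  unfold Spec_preprocess_one_sequence_py preprocess_one_sequence_py preprocess_one_sequence_py_alt
  simpa using pv_fold_general xs [] [] []
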